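-- pv_equiv track=rewrite | github.com/PentHertz/urh-ng | src/urh/awre/ProtocolMatcher.py | _find_data_start
-- ===== SOURCE A (Python) =====
-- def _find_data_start(bits: str) -> int:
--     """
--     Find where the actual data starts in a decoded bit string,
--     skipping leading zeros, preamble, and gap.
--
--     Handles both:
--     - Alternating preamble (10101010...) in raw/NRZ signals
--     - Constant preamble (111111... or 000000...) after PWM decoding
--     """
--     if not bits:
--         return 0
--
--     # Skip leading zeros
--     i = 0
--     while i < len(bits) and bits[i] == "0":
--         i += 1
--
--     if i >= len(bits):
--         return 0
--
--     # Try alternating preamble first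
--     alt_start = i
--     alt_i = i
--     while alt_i < len(bits) - 1:
--         if bits[alt_i] == bits[alt_i + 1]:
--             break
--         alt_i += 1
--     alt_len = alt_i - alt_start
--
--     # Try constant-value preamble (run of same bit)
--     const_start = i
--     const_val = bits[i]
--     const_i = i
--     while const_i < len(bits) and bits[const_i] == const_val:
--         const_i += 1
--     const_len = const_i - const_start
--
--     # Pick whichever preamble type is longer (and >= 4 bits)
--     if alt_len >= 4 and alt_len >= const_len:
--         i = alt_i
--     elif const_len >= 4:
--         i = const_i
--     # else: no preamble found, i stays at first non-zero
--
--     # Skip zero gap after preamble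
--     while i < len(bits) and bits[i] == "0":
--         i += 1
--
--     return i
-- ===== SOURCE B (Python) =====
-- def _after_skip(rs, i):
--     """rs: run list after skipping a leading zero run; i: index of its start."""
--     if not rs:
--         return 0  # string was empty or all zeros
--     const_len = rs[0][1]
--     # alternating preamble = maximal prefix of length-1 runs; if it reaches
--     # the end of the string the scan stops one position short of it
--     k = 0
--     while k < len(rs) and rs[k][1] == 1:
--         k += 1
--     alt_len = k - 1 if k == len(rs) else k
--     # selection: landing position and the run list starting there
--     if alt_len >= 4 and alt_len >= const_len:
--         t = (i + alt_len, rs[k - 1 if k == len(rs) else k:])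
--     elif const_len >= 4:
--         t = (i + const_len, rs[1:])
--     else:
--         t = (i, rs)
--     # skip at most one zero run after the preamble
--     if t[1] and t[1][0][0] == "0":
--         return t[0] + t[1][0][1]
--     return t[0]
--
--
-- def _find_data_start(bits: str) -> int:
--     """Run-length based reimplementation: build the run decomposition once,
--     then read the preamble lengths and gap skip off the run list."""
--     runs = []  # list of (char, length)
--     for ch in bits:
--         if runs and runs[-1][0] == ch:
--             runs[-1] = (ch, runs[-1][1] + 1)
--         else:
--             runs.append((ch, 1))
--     if not runs:
--         return 0
--     c0, n0 = runs[0]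
--     if c0 == "0":
--         return _after_skip(runs[1:], n0)
--     return _after_skip(runs, 0)
-- ===== Notes on version B (the rewrite author's own statement) =====
-- stated objective: alternative
-- what changed: B builds the run-length decomposition of the bit string in one pass and reads the preamble lengths and zero-gap skip off the run list arithmetically, instead of A's four separate index-scanning while-loops.
import Mathlib
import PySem

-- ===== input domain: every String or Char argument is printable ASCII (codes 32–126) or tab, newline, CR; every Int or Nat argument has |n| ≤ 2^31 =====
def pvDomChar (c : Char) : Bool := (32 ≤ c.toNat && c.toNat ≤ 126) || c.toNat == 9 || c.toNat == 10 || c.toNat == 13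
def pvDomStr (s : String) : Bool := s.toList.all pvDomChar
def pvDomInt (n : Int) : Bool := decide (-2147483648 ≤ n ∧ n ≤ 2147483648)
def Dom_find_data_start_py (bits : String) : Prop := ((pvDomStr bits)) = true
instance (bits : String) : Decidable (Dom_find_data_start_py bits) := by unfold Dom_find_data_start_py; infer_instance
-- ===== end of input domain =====

-- B replaces A's four index-scanning while-loops by one run-length decomposition
-- read off arithmetically (alternative algorithm, same asymptotic cost).


-- ===== PORT A =====
-- "while i < len(bits) and bits[i] == '0': i += 1", on the suffix bits[i:]
def skipZerosA : List Char → Nat → (List Char × Nat)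
  | [], i => ([], i)
  | c :: rest, i => if c == '0' then skipZerosA rest (i + 1) else (c :: rest, i)

-- "while alt_i < len(bits)-1: if bits[alt_i]==bits[alt_i+1]: break; alt_i += 1"
def altScanA : List Char → Nat → (List Char × Nat)
  | c1 :: c2 :: rest, i =>
      if c1 == c2 then (c1 :: c2 :: rest, i) else altScanA (c2 :: rest) (i + 1)
  | s, i => (s, i)

-- "while const_i < len(bits) and bits[const_i] == const_val: const_i += 1"
def constScanA : List Char → Char → Nat → (List Char × Nat)
  | [], _, i => ([], i)
  | c :: rest, v, i => if c == v then constScanA rest v (i + 1) else (c :: rest, i)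

-- the part of A after the leading-zero skip (s = bits[i:], i = current index)
def afterSkipA (s : List Char) (i : Nat) : Int :=
  match s with
  | [] => 0                                   -- "if i >= len(bits): return 0"
  | v :: _ =>
    let pa := altScanA s i
    let alt_len := pa.2 - i
    let pc := constScanA s v i
    let const_len := pc.2 - i
    let r := if alt_len ≥ 4 ∧ alt_len ≥ const_len then pa
             else if const_len ≥ 4 then pc
             else (s, i)
    ((skipZerosA r.1 r.2).2 : Int)

def find_data_start_py (bits : String) : Int :=
  let cs := bits.toList
  if cs = [] then 0                           -- "if not bits: return 0"
  else
    let si := skipZerosA cs 0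
    afterSkipA si.1 si.2

-- ===== PORT B =====
-- run-length decomposition (Source B builds it left-to-right updating the last run;
-- this structural recursion groups the same maximal runs)
def buildRuns : List Char → List (Char × Nat)
  | [] => []
  | c :: rest =>
    match buildRuns rest with
    | (c', n) :: rs => if c == c' then (c, n + 1) :: rs else (c, 1) :: (c', n) :: rs
    | [] => [(c, 1)]

-- "while k < len(rs) and rs[k][1] == 1: k += 1"
def countOnes : List (Char × Nat) → Nat
  | [] => 0
  | (_, n) :: rs => if n = 1 then countOnes rs + 1 else 0

def afterSkipB (rs : List (Char × Nat)) (i : Nat) : Int :=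
  match rs with
  | [] => 0
  | (_, n1) :: _ =>
    let const_len := n1
    let k := countOnes rs
    let alt_len := if k = rs.length then k - 1 else k
    let t := if alt_len ≥ 4 ∧ alt_len ≥ const_len then
               (i + alt_len, rs.drop (if k = rs.length then k - 1 else k))
             else if const_len ≥ 4 then (i + const_len, rs.drop 1)
             else (i, rs)
    match t.2 with
    | (c, n) :: _ => ((if c == '0' then t.1 + n else t.1 : Nat) : Int)
    | [] => (t.1 : Int)

def find_data_start_py_alt (bits : String) : Int :=
  match buildRuns bits.toList with
  | [] => 0
  | (c0, n0) :: rest =>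
    if c0 == '0' then afterSkipB rest n0
    else afterSkipB ((c0, n0) :: rest) 0

-- ===== PRECONDITION & SPEC =====
def Spec_find_data_start_py (bits : String) (out : Int) : Prop := out = find_data_start_py_alt bits
instance (bits : String) (out : Int) : Decidable (Spec_find_data_start_py bits out) := by unfold Spec_find_data_start_py; infer_instance

-- ===== CLAIM (what is proved, stated in full; the proofs are below) =====
def Claim_equal_find_data_start_py : Prop := ∀ (bits : String), Dom_find_data_start_py bits → Spec_find_data_start_py bits (find_data_start_py bits)

-- ===== LEMMAS AND PROOFS =====

-- number of characters the alternating scan advances, read off the run list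
def altD (rs : List (Char × Nat)) : Nat :=
  if countOnes rs = rs.length then countOnes rs - 1 else countOnes rs

-- characters the final zero-skip advances, read off the run list
def zeroHead : List (Char × Nat) → Nat
  | [] => 0
  | (c, n) :: _ => if c == '0' then n else 0

lemma skipZerosA_eq (cs : List Char) (i : Nat) :
    skipZerosA cs i =
      (cs.dropWhile (fun c => c == '0'), i + (cs.takeWhile (fun c => c == '0')).length) := by
  induction cs generalizing i with
  | nil => simp [skipZerosA]
  | cons c rest ih =>
    by_cases h : c == '0' <;>
      simp [skipZerosA, h, ih, List.dropWhile, List.takeWhile] <;> omega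

lemma constScanA_eq (cs : List Char) (v : Char) (i : Nat) :
    constScanA cs v i =
      (cs.dropWhile (fun c => c == v), i + (cs.takeWhile (fun c => c == v)).length) := by
  induction cs generalizing i with
  | nil => simp [constScanA]
  | cons c rest ih =>
    by_cases h : c == v <;>
      simp [constScanA, h, ih, List.dropWhile, List.takeWhile] <;> omega

lemma buildRuns_cons (c : Char) (cs : List Char) :
    buildRuns (c :: cs) =
      (c, 1 + (cs.takeWhile (fun x => x == c)).length) :: buildRuns (cs.dropWhile (fun x => x == c)) := by
  induction cs generalizing c with
  | nil => simp [buildRuns]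
  | cons d t ih =>
    have e : buildRuns (c :: d :: t)
        = (match buildRuns (d :: t) with
           | (c', n) :: rs => if c == c' then (c, n + 1) :: rs else (c, 1) :: (c', n) :: rs
           | [] => [(c, 1)]) := rfl
    by_cases hc : c = d
    · subst hc
      rw [e, ih c]
      simp [List.takeWhile_cons, List.dropWhile_cons]
      omega
    · have hcd : (c == d) = false := by simp [hc]
      have hdc : (d == c) = false := by simp [Ne.symm hc]
      rw [e, ih d]
      simp [List.takeWhile_cons, List.dropWhile_cons, hcd, hdc, ih d]

lemma buildRuns_nil_iff (s : List Char) : buildRuns s = [] ↔ s = [] := by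
  cases s with
  | nil => simp [buildRuns]
  | cons c cs => simp [buildRuns_cons]

lemma countOnes_le (rs : List (Char × Nat)) : countOnes rs ≤ rs.length := by
  induction rs with
  | nil => simp [countOnes]
  | cons p rs ih =>
    obtain ⟨c, n⟩ := p
    simp only [countOnes, List.length_cons]
    split <;> omega

lemma altD_cons_one (c : Char) (rs : List (Char × Nat)) (h : rs ≠ []) :
    altD ((c, 1) :: rs) = altD rs + 1 := by
  have hle := countOnes_le rs
  have hlen : 1 ≤ rs.length := by cases rs <;> simp_all
  simp only [altD, countOnes, List.length_cons, if_pos rfl]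
  split_ifs <;> omega

lemma altScanA_eq (s : List Char) (i : Nat) :
    altScanA s i = (s.drop (altD (buildRuns s)), i + altD (buildRuns s)) := by
  induction s generalizing i with
  | nil => simp [altScanA, buildRuns, altD, countOnes]
  | cons c s' ih =>
    cases s' with
    | nil => simp [altScanA, buildRuns, altD, countOnes]
    | cons d t =>
      by_cases hc : c = d
      · subst hc
        have hd : altD (buildRuns (c :: c :: t)) = 0 := by
          rw [buildRuns_cons]
          have h3 : ((c :: t).takeWhile (fun x => x == c)).length = (t.takeWhile (fun x => x == c)).length + 1 := by
            simp [List.takeWhile_cons]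
          simp only [altD, countOnes, h3]
          have h2 : ¬ (1 + ((t.takeWhile (fun x => x == c)).length + 1) = 1) := by omega
          simp [h2]
        rw [hd]
        simp [altScanA]
      · have hcd : (c == d) = false := by simp [hc]
        have hdc : (d == c) = false := by simp [Ne.symm hc]
        have hne : buildRuns (d :: t) ≠ [] := by
          rw [Ne, buildRuns_nil_iff]; simp
        have hb : buildRuns (c :: d :: t) = (c, 1) :: buildRuns (d :: t) := by
          rw [buildRuns_cons]
          simp [List.takeWhile_cons, List.dropWhile_cons, hcd, hdc]
        rw [hb, altD_cons_one c _ hne]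
        simp only [altScanA, hcd, Bool.false_eq_true, if_false]
        rw [ih]
        simp [List.drop_succ_cons]
        omega

lemma buildRuns_drop_altD (s : List Char) :
    buildRuns (s.drop (altD (buildRuns s))) = (buildRuns s).drop (altD (buildRuns s)) := by
  induction s with
  | nil => simp [buildRuns, altD, countOnes]
  | cons c s' ih =>
    cases s' with
    | nil => simp [buildRuns, altD, countOnes]
    | cons d t =>
      by_cases hc : c = d
      · subst hc
        have hd : altD (buildRuns (c :: c :: t)) = 0 := by
          rw [buildRuns_cons]
          have h3 : ((c :: t).takeWhile (fun x => x == c)).length = (t.takeWhile (fun x => x == c)).length + 1 := by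
            simp [List.takeWhile_cons]
          simp only [altD, countOnes, h3]
          have h2 : ¬ (1 + ((t.takeWhile (fun x => x == c)).length + 1) = 1) := by omega
          simp [h2]
        simp [hd]
      · have hcd : (c == d) = false := by simp [hc]
        have hdc : (d == c) = false := by simp [Ne.symm hc]
        have hne : buildRuns (d :: t) ≠ [] := by
          rw [Ne, buildRuns_nil_iff]; simp
        have hb : buildRuns (c :: d :: t) = (c, 1) :: buildRuns (d :: t) := by
          rw [buildRuns_cons]
          simp [List.takeWhile_cons, List.dropWhile_cons, hcd, hdc]
        rw [hb, altD_cons_one c _ hne]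
        simpa using ih

lemma takeWhile_zero_eq (s : List Char) :
    (s.takeWhile (fun c => c == '0')).length = zeroHead (buildRuns s) := by
  cases s with
  | nil => simp [buildRuns, zeroHead]
  | cons c cs =>
    rw [buildRuns_cons]
    by_cases h : c == '0'
    · have hc : c = '0' := by simpa using h
      subst hc
      simp [List.takeWhile, zeroHead]
      omega
    · simp [List.takeWhile, h, zeroHead]

lemma core (s : List Char) (i : Nat) : afterSkipA s i = afterSkipB (buildRuns s) i := by
  cases s with
  | nil => simp [afterSkipA, buildRuns, afterSkipB]
  | cons v cs =>
    have hcl : ((v :: cs).takeWhile (fun c => c == v)).length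
        = 1 + (cs.takeWhile (fun x => x == v)).length := by
      simp [List.takeWhile_cons]
      omega
    set cl := 1 + (cs.takeWhile (fun x => x == v)).length with hcl'
    set rest := buildRuns (cs.dropWhile (fun x => x == v)) with hrest
    have hruns : buildRuns (v :: cs) = (v, cl) :: rest := buildRuns_cons v cs
    rw [hruns]
    simp only [afterSkipA, afterSkipB, altScanA_eq, constScanA_eq, skipZerosA_eq, hruns, hcl]
    have e1 : i + altD ((v, cl) :: rest) - i = altD ((v, cl) :: rest) := by omega
    have e2 : i + cl - i = cl := by omega
    have e3 : (if countOnes ((v, cl) :: rest) = ((v, cl) :: rest).length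
          then countOnes ((v, cl) :: rest) - 1 else countOnes ((v, cl) :: rest))
        = altD ((v, cl) :: rest) := rfl
    simp only [e1, e2, e3]
    set E := altD ((v, cl) :: rest) with hE
    by_cases h1 : E ≥ 4 ∧ E ≥ cl
    · simp only [if_pos h1]
      have hsuffix : buildRuns ((v :: cs).drop E) = ((v, cl) :: rest).drop E := by
        have := buildRuns_drop_altD (v :: cs)
        rw [hruns] at this
        exact this
      have hz := takeWhile_zero_eq ((v :: cs).drop E)
      rw [hsuffix] at hz
      cases hdrop : ((v, cl) :: rest).drop E with
      | nil =>
        rw [hdrop] at hz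
        simp only [zeroHead] at hz
        simp [hdrop, hz]
      | cons p tl =>
        obtain ⟨c, n⟩ := p
        rw [hdrop] at hz
        simp only [zeroHead] at hz
        simp only [hdrop]
        rw [hz]
        by_cases hc0 : c == '0' <;> simp [hc0]
    · simp only [if_neg h1]
      by_cases h2 : cl ≥ 4
      · simp only [if_pos h2]
        have hdw : (v :: cs).dropWhile (fun c => c == v) = cs.dropWhile (fun x => x == v) := by
          simp [List.dropWhile_cons]
        have hz := takeWhile_zero_eq ((v :: cs).dropWhile (fun c => c == v))
        rw [hdw, ← hrest] at hz
        cases hdrop : rest with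
        | nil =>
          rw [hdrop] at hz
          simp only [zeroHead] at hz
          simp [hdw, hdrop, hz]
        | cons p tl =>
          obtain ⟨c, n⟩ := p
          rw [hdrop] at hz
          simp only [zeroHead] at hz
          simp only [hdw, hdrop]
          rw [hz]
          by_cases hc0 : c == '0' <;> simp [hc0]
      · simp only [if_neg h2]
        have hz := takeWhile_zero_eq (v :: cs)
        rw [hruns] at hz
        simp only [zeroHead] at hz
        rw [hz]
        by_cases hv : v == '0' <;> simp [hv]

-- ===== VERDICT (by name: the statement is the Claim_ definition above) =====
theorem find_data_start_py_spec : Claim_equal_find_data_start_py := by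
  intro bits _
  unfold Spec_find_data_start_py find_data_start_py find_data_start_py_alt
  cases hcs : bits.toList with
  | nil => simp [buildRuns]
  | cons c cs =>
    have hne : (c :: cs) ≠ [] := by simp
    rw [if_neg hne]
    by_cases h : c == '0'
    · have hc : c = '0' := by simpa using h
      subst hc
      simp [core, buildRuns_cons, skipZerosA_eq, List.dropWhile_cons, List.takeWhile_cons]
      try congr 1
      all_goals omega
    · have hcd : (c == '0') = false := by simpa using h
      simp [core, buildRuns_cons, skipZerosA_eq, List.dropWhile_cons, List.takeWhile_cons, hcd]
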